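-- pv_equiv track=rewrite | github.com/ropeck/aoc | 23/step1.py | enlarge_board
-- ===== SOURCE A (Python) =====
-- def enlarge_board(b):
--   if "#" in b[0]:
--     b = [["." for x in b[0]]] + b
--   if "#" in b[-1]:
--     b = b + [["." for x in b[0]]]
--   if any([b[y][0] == "#" for y in range(len(b))]):
--     c = [["."] + l for l in b]
--     b = c
--   if any([b[y][-1] == "#" for y in range(len(b))]):
--     c = [l + ["."] for l in b]
--     b = c
--   return b
-- ===== SOURCE B (Python) =====
-- def _row(b, dt, dl, dr, h, i):
--   inside = dt <= i < dt + h
--   src = b[i - dt] if inside else b[0]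
--   return [src[j - dl] if inside and 0 <= j - dl < len(src) else "."
--           for j in range(len(src) + dl + dr)]
--
-- def enlarge_board(b):
--   dt = 1 if "#" in b[0] else 0
--   db = 1 if "#" in b[-1] else 0
--   dl = 1 if any(r[0] == "#" for r in b) else 0
--   dr = 1 if any(r[-1] == "#" for r in b) else 0
--   h = len(b)
--   return [_row(b, dt, dl, dr, h, i) for i in range(h + dt + db)]
-- ===== Notes on version B (the rewrite author's own statement) =====
-- stated objective: alternative
-- what changed: B builds the output by coordinate arithmetic: it computes the four border offsets, then generates every output cell by index over ranges (cell (i,j) = b[i-dt][j-dl] if that coordinate lies inside the original grid, else '.'), instead of A's four sequential whole-grid rebuilds by list concatenation.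
import Mathlib
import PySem

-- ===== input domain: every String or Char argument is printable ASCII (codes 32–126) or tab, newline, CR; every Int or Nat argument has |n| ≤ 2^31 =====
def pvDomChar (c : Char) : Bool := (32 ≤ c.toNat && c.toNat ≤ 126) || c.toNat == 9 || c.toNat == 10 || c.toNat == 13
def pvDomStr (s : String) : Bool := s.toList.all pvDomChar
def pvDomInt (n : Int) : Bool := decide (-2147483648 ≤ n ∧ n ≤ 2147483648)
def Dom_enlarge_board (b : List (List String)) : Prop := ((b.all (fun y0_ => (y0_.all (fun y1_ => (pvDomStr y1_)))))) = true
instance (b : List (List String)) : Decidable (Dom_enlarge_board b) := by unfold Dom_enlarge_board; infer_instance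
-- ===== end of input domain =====

-- B generates the enlarged grid by coordinate arithmetic (index lookup with offsets over
-- ranges) instead of A's four sequential concatenation rebuilds (objective: alternative).


-- ===== PORT A =====
-- literal transliteration of A: four sequential conditional rebuilds of the grid
def enlarge_board (b : List (List String)) : List (List String) :=
  let b1 := if "#" ∈ b.headD [] then ((b.headD []).map (fun _ => ".")) :: b else b
  let b2 := if "#" ∈ b1.getLastD [] then b1 ++ [(b1.headD []).map (fun _ => ".")] else b1
  let b3 := if b2.any (fun l => l.headD "" == "#") then b2.map (fun l => "." :: l) else b2
  let b4 := if b3.any (fun l => l.getLastD "" == "#") then b3.map (fun l => l ++ ["."]) else b3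
  b4

-- ===== PORT B =====
-- literal transliteration of B (Source B): offsets, then every cell by index arithmetic.
-- src[j-dl] / b[i-dt] are read only when the guard proves the index in range, so
-- pyGet?.getD is exact there; b[0] only feeds pad rows and b ≠ [] under Pre_.
def pvRowB (b : List (List String)) (dt dl dr h : Int) (i : Int) : List String :=
  let inside := dt ≤ i ∧ i < dt + h
  let src := if dt ≤ i ∧ i < dt + h then (PySem.List.pyGet? b (i - dt)).getD []
             else (PySem.List.pyGet? b 0).getD []
  (PySem.List.pyRange 0 ((src.length : Int) + dl + dr) 1).map
    (fun j => if inside ∧ 0 ≤ j - dl ∧ j - dl < (src.length : Int)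
              then (PySem.List.pyGet? src (j - dl)).getD "." else ".")

def enlarge_board_alt (b : List (List String)) : List (List String) :=
  let dt : Int := if "#" ∈ (PySem.List.pyGet? b 0).getD [] then 1 else 0
  let db : Int := if "#" ∈ (PySem.List.pyGet? b (-1)).getD [] then 1 else 0
  let dl : Int := if b.any (fun r => (PySem.List.pyGet? r 0).getD "" == "#") then 1 else 0
  let dr : Int := if b.any (fun r => (PySem.List.pyGet? r (-1)).getD "" == "#") then 1 else 0
  let h : Int := b.length
  (PySem.List.pyRange 0 (h + dt + db) 1).map (pvRowB b dt dl dr h)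

-- ===== PRECONDITION & SPEC =====
-- Pre_ excludes exactly the inputs on which A raises IndexError: an empty grid
-- (b[0] raises) or a grid containing an empty row (b[y][0] raises).
def Pre_enlarge_board (b : List (List String)) : Prop := b ≠ [] ∧ ∀ r ∈ b, r ≠ []
instance (b : List (List String)) : Decidable (Pre_enlarge_board b) := by unfold Pre_enlarge_board; infer_instance
def pvWitness_enlarge_board : List (List String) := [["#", "."], [".", "."]]
def Spec_enlarge_board (b : List (List String)) (out : List (List String)) : Prop := out = enlarge_board_alt b
instance (b : List (List String)) (out : List (List String)) : Decidable (Spec_enlarge_board b out) := by unfold Spec_enlarge_board; infer_instance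

-- ===== CLAIM (what is proved, stated in full; the proofs are below) =====
def Claim_equal_enlarge_board : Prop := ∀ (b : List (List String)), Dom_enlarge_board b → Pre_enlarge_board b → Spec_enlarge_board b (enlarge_board b)

-- ===== LEMMAS AND PROOFS =====

-- proof-only intermediate form: flags + one construction (bridge between A and B)
def pvFlagsBuild (b : List (List String)) : List (List String) :=
  let top := "#" ∈ b.headD []
  let bottom := "#" ∈ b.getLastD []
  let left := b.any (fun row => row.headD "" == "#")
  let right := b.any (fun row => row.getLastD "" == "#")
  let rows := b.map (fun row => (if left then ["."] else []) ++ row ++ (if right then ["."] else []))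
  let w := (b.headD []).length + (if left then 1 else 0) + (if right then 1 else 0)
  let rows2 := if top then List.replicate w "." :: rows else rows
  if bottom then rows2 ++ [List.replicate w "."] else rows2

theorem lastD_cons {α : Type} (a : α) (l : List α) (d : α) :
    (a :: l).getLast?.getD d = l.getLast?.getD a := by
  cases l with
  | nil => simp
  | cons b t =>
    rw [List.getLast?_cons_cons]
    rw [List.getLast?_eq_some_getLast (l := (b :: t)) (by simp)]
    simp

theorem lastD_irrel {α : Type} (l : List α) (h : l ≠ []) (a b : α) :
    l.getLast?.getD a = l.getLast?.getD b := by
  rw [List.getLast?_eq_some_getLast (l := l) h]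
  simp

theorem repl_last (n : Nat) (x : String) : (List.replicate n x).getLast?.getD x = x := by
  induction n with
  | zero => rfl
  | succ m ih => simpa [List.replicate_succ, lastD_cons] using ih

theorem repl_snoc {α : Type} (n : Nat) (a : α) :
    List.replicate n a ++ [a] = a :: List.replicate n a := by
  rw [← List.replicate_succ, ← List.replicate_succ']

theorem exists_dotD (bs : List (List String)) (h : ∀ l ∈ bs, l ≠ []) :
    (∃ x ∈ bs, x.getLast?.getD "." = "#") ↔ (∃ x ∈ bs, x.getLast?.getD "" = "#") := by
  constructor <;> rintro ⟨x, hx, he⟩ <;>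
    exact ⟨x, hx, (lastD_irrel x (h x hx) _ _).trans he⟩

theorem A_eq_flags : ∀ (b : List (List String)), Pre_enlarge_board b → enlarge_board b = pvFlagsBuild b := by
  intro b hpre
  obtain ⟨hb, hr⟩ := hpre
  cases b with
  | nil => exact absurd rfl hb
  | cons r bs =>
    have hrne : r ≠ [] := hr r (List.mem_cons_self ..)
    cases r with
    | nil => exact absurd rfl hrne
    | cons s rs =>
      have hbs : ∀ l ∈ bs, l ≠ [] := fun l hl => hr l (List.mem_cons_of_mem _ hl)
      by_cases hT : ("#":String) ∈ s :: rs <;>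
      by_cases hBt : ("#":String) ∈ bs.getLast?.getD (s :: rs) <;>
      by_cases hL : (s = "#" ∨ ∃ x ∈ bs, x.head?.getD "" = "#") <;>
      by_cases hR : (rs.getLast?.getD s = "#" ∨ ∃ x ∈ bs, x.getLast?.getD "" = "#") <;>
        simp [enlarge_board, pvFlagsBuild, hT, hBt, hL, hR, lastD_cons, repl_last,
          repl_snoc, exists_dotD _ hbs, List.map_map, Function.comp, List.replicate_succ]

-- B-side normalisation ---------------------------------------------------------

theorem map_getD_range' {α β : Type} (l : List α) (d : α) (g : α → β) :
    (List.range l.length).map (fun k => g (l.getD k d)) = l.map g := by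
  apply List.ext_getElem
  · simp
  · intro i h1 h2
    have h3 : i < l.length := by simpa using h2
    simp [List.getElem?_eq_getElem h3]

theorem pyRange_sing (a b : Int) (h1 : a < b) (h2 : b ≤ a + 1) :
    PySem.List.pyRange a b 1 = [a] := by
  rw [PySem.List.pyRange_one_cons h1, PySem.List.pyRange_one_eq_nil (by omega)]

theorem base_row (r : List String) (c : Int) :
    (PySem.List.pyRange c (c + r.length) 1).map
      (fun j => if 0 ≤ j - c ∧ j - c < (r.length : Int) then (PySem.List.pyGet? r (j - c)).getD "." else ".") = r := by
  rw [PySem.List.pyRange_one, List.map_map]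
  simp only [add_sub_cancel_left, Int.toNat_natCast]
  rw [List.map_congr_left (g := fun k => r.getD k "")]
  · simpa using map_getD_range' r "" id
  · intro k hk
    simp at hk
    simp [hk, List.getD]

theorem base_row0 (r : List String) :
    (PySem.List.pyRange 0 (r.length : Int) 1).map
      (fun j => if 0 ≤ j ∧ j < (r.length : Int) then (PySem.List.pyGet? r j).getD "." else ".") = r := by
  have h := base_row r 0
  simp only [zero_add, sub_zero] at h
  exact h

theorem base_row1 (r : List String) :
    (PySem.List.pyRange 1 ((r.length : Int) + 1) 1).map
      (fun j => if 0 ≤ j - 1 ∧ j - 1 < (r.length : Int) then (PySem.List.pyGet? r (j - 1)).getD "." else ".") = r := by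
  have h := base_row r 1
  rw [show (1 : Int) + (r.length : Int) = (r.length : Int) + 1 from by ring] at h
  exact h

theorem pad_row (m : Int) :
    (PySem.List.pyRange 0 m 1).map (fun _ => (".":String)) = List.replicate m.toNat "." := by
  rw [PySem.List.pyRange_one, List.map_map]
  simp [Function.comp_def]

theorem core_row (r : List String) (dl dr : Int) (hdl : dl = 0 ∨ dl = 1) (hdr : dr = 0 ∨ dr = 1) :
    (PySem.List.pyRange 0 ((r.length : Int) + dl + dr) 1).map
      (fun j => if 0 ≤ j - dl ∧ j - dl < (r.length : Int) then (PySem.List.pyGet? r (j - dl)).getD "." else ".")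
    = (if dl = 1 then ["."] else []) ++ r ++ (if dr = 1 then ["."] else []) := by
  rcases hdl with h1 | h1 <;> rcases hdr with h2 | h2 <;> subst h1 <;> subst h2
  · -- dl = 0, dr = 0
    simp only [add_zero, sub_zero]
    rw [base_row0 r]
    simp
  · -- dl = 0, dr = 1
    simp only [add_zero, sub_zero]
    rw [PySem.List.pyRange_one_append 0 (r.length : Int) ((r.length : Int) + 1) (by omega) (by omega),
      List.map_append, pyRange_sing (r.length : Int) ((r.length : Int) + 1) (by omega) (by omega),
      base_row0 r]
    simp
  · -- dl = 1, dr = 0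
    simp only [add_zero]
    rw [PySem.List.pyRange_one_append 0 1 ((r.length : Int) + 1) (by omega) (by omega),
      List.map_append, pyRange_sing 0 1 (by omega) (by omega), base_row1 r]
    simp
  · -- dl = 1, dr = 1
    rw [PySem.List.pyRange_one_append 0 1 ((r.length : Int) + 1 + 1) (by omega) (by omega),
      PySem.List.pyRange_one_append 1 ((r.length : Int) + 1) ((r.length : Int) + 1 + 1) (by omega) (by omega),
      List.map_append, List.map_append, pyRange_sing 0 1 (by omega) (by omega),
      pyRange_sing ((r.length : Int) + 1) ((r.length : Int) + 1 + 1) (by omega) (by omega),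
      base_row1 r]
    simp

theorem rowB_out (b : List (List String)) (dt dl dr h i : Int)
    (hout : ¬ (dt ≤ i ∧ i < dt + h)) :
    pvRowB b dt dl dr h i
      = List.replicate (((((PySem.List.pyGet? b 0).getD []).length : Int) + dl + dr).toNat) "." := by
  unfold pvRowB
  rw [if_neg hout]
  rw [List.map_congr_left (g := fun _ => (".":String)) (by intro j hj; simp [hout])]
  exact pad_row _

theorem rowB_in (b : List (List String)) (dt dl dr : Int) (k : Nat) (hk : k < b.length) :
    pvRowB b dt dl dr b.length (dt + (k : Int))
      = (PySem.List.pyRange 0 (((b.getD k []).length : Int) + dl + dr) 1).map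
          (fun j => if 0 ≤ j - dl ∧ j - dl < ((b.getD k []).length : Int)
                    then (PySem.List.pyGet? (b.getD k []) (j - dl)).getD "." else ".") := by
  have hin : dt ≤ dt + (k : Int) ∧ dt + (k : Int) < dt + (b.length : Int) := by
    constructor <;> omega
  unfold pvRowB
  rw [if_pos hin]
  simp [hin, add_sub_cancel_left, List.getD]

theorem mid_map (b : List (List String)) (dt dl dr : Int) :
    (PySem.List.pyRange dt (dt + (b.length : Int)) 1).map (pvRowB b dt dl dr b.length)
      = b.map (fun r => (PySem.List.pyRange 0 ((r.length : Int) + dl + dr) 1).map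
          (fun j => if 0 ≤ j - dl ∧ j - dl < (r.length : Int)
                    then (PySem.List.pyGet? r (j - dl)).getD "." else ".")) := by
  rw [PySem.List.pyRange_one, List.map_map]
  simp only [add_sub_cancel_left, Int.toNat_natCast, Function.comp_def]
  rw [List.map_congr_left
      (g := fun k => (PySem.List.pyRange 0 (((b.getD k []).length : Int) + dl + dr) 1).map
          (fun j => if 0 ≤ j - dl ∧ j - dl < ((b.getD k []).length : Int)
                    then (PySem.List.pyGet? (b.getD k []) (j - dl)).getD "." else "."))]
  · exact map_getD_range' b []
      (fun r => (PySem.List.pyRange 0 ((r.length : Int) + dl + dr) 1).map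
          (fun j => if 0 ≤ j - dl ∧ j - dl < (r.length : Int)
                    then (PySem.List.pyGet? r (j - dl)).getD "." else "."))
  · intro k hk
    simp at hk
    exact rowB_in b dt dl dr k hk

theorem alt_shape (b : List (List String)) (dt db dl dr : Int)
    (hdt : dt = 0 ∨ dt = 1) (hdb : db = 0 ∨ db = 1) (hdl : dl = 0 ∨ dl = 1) (hdr : dr = 0 ∨ dr = 1) :
    (PySem.List.pyRange 0 ((b.length : Int) + dt + db) 1).map (pvRowB b dt dl dr b.length)
      = (if dt = 1 then [List.replicate (((PySem.List.pyGet? b 0).getD []).length + dl.toNat + dr.toNat) "."] else [])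
        ++ b.map (fun r => (if dl = 1 then ["."] else []) ++ r ++ (if dr = 1 then ["."] else []))
        ++ (if db = 1 then [List.replicate (((PySem.List.pyGet? b 0).getD []).length + dl.toNat + dr.toNat) "."] else []) := by
  have hdt0 : 0 ≤ dt := by rcases hdt with h | h <;> omega
  have hdb0 : 0 ≤ db := by rcases hdb with h | h <;> omega
  have hdl0 : 0 ≤ dl := by rcases hdl with h | h <;> omega
  have hdr0 : 0 ≤ dr := by rcases hdr with h | h <;> omega
  have harith : ((((PySem.List.pyGet? b 0).getD []).length : Int) + dl + dr).toNat
      = ((PySem.List.pyGet? b 0).getD []).length + dl.toNat + dr.toNat := by omega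
  rw [PySem.List.pyRange_one_append 0 dt ((b.length : Int) + dt + db) hdt0 (by omega),
    PySem.List.pyRange_one_append dt (dt + (b.length : Int)) ((b.length : Int) + dt + db) (by omega) (by omega),
    List.map_append, List.map_append, mid_map,
    List.map_congr_left (fun r _ => core_row r dl dr hdl hdr)]
  have hfront : (PySem.List.pyRange 0 dt 1).map (pvRowB b dt dl dr b.length)
      = (if dt = 1 then [List.replicate (((PySem.List.pyGet? b 0).getD []).length + dl.toNat + dr.toNat) "."] else []) := by
    rcases hdt with h | h <;> subst h
    · rw [PySem.List.pyRange_one_eq_nil (by omega)]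
      simp
    · rw [pyRange_sing 0 1 (by omega) (by omega)]
      simp [rowB_out b 1 dl dr (b.length : Int) 0 (by omega), harith]
  have hback : (PySem.List.pyRange (dt + (b.length : Int)) ((b.length : Int) + dt + db) 1).map
        (pvRowB b dt dl dr b.length)
      = (if db = 1 then [List.replicate (((PySem.List.pyGet? b 0).getD []).length + dl.toNat + dr.toNat) "."] else []) := by
    rcases hdb with h | h <;> subst h
    · rw [PySem.List.pyRange_one_eq_nil (by omega)]
      simp
    · rw [pyRange_sing (dt + (b.length : Int)) ((b.length : Int) + dt + 1) (by omega) (by omega)]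
      simp [rowB_out b dt dl dr (b.length : Int) (dt + (b.length : Int)) (by omega), harith]
  rw [hfront, hback, List.append_assoc]

theorem alt_eq_flags : ∀ (b : List (List String)), Pre_enlarge_board b → enlarge_board_alt b = pvFlagsBuild b := by
  intro b hpre
  obtain ⟨hb, _⟩ := hpre
  have e1 : (PySem.List.pyGet? b 0).getD [] = b.headD [] := by
    cases b with
    | nil => exact absurd rfl hb
    | cons r bs => simp [PySem.List.pyGet?_zero_cons]
  have e2 : (PySem.List.pyGet? b (-1)).getD [] = b.getLastD [] := by
    rw [PySem.List.pyGet?_neg_one, List.getLastD_eq_getLast?]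
  have e3 : (b.any (fun r => (PySem.List.pyGet? r 0).getD "" == "#"))
      = (b.any (fun r => r.headD "" == "#")) := by
    apply PySem.List.any_congr_mem
    intro r _
    rw [PySem.List.pyGet?_zero]
    cases r <;> simp
  have e4 : (b.any (fun r => (PySem.List.pyGet? r (-1)).getD "" == "#"))
      = (b.any (fun r => r.getLastD "" == "#")) := by
    apply PySem.List.any_congr_mem
    intro r _
    rw [PySem.List.pyGet?_neg_one, List.getLastD_eq_getLast?]
  simp only [enlarge_board_alt, pvFlagsBuild]
  rw [e1, e2, e3, e4]
  by_cases hT : "#" ∈ b.headD [] <;>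
  by_cases hBt : "#" ∈ b.getLastD [] <;>
  by_cases hL : (b.any (fun r => r.headD "" == "#")) = true <;>
  by_cases hR : (b.any (fun r => r.getLastD "" == "#")) = true <;>
    · simp only [hT, hBt, hL, hR, if_true, if_false, Bool.false_eq_true]
      rw [alt_shape b _ _ _ _ (by norm_num) (by norm_num) (by norm_num) (by norm_num)]
      simp [hT, hBt, hL, hR, e1]

theorem enlarge_board_main' (b : List (List String)) (h : Pre_enlarge_board b) :
    enlarge_board b = enlarge_board_alt b :=
  (A_eq_flags b h).trans (alt_eq_flags b h).symm

-- ===== VERDICT (by name: the statement is the Claim_ definition above) =====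
theorem enlarge_board_spec : Claim_equal_enlarge_board := by
  intro b _ hpre
  exact enlarge_board_main' b hpre
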